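-- pv_equiv track=rewrite | github.com/Junior-chuks/Toy-robot-basic-commands | robot.py | increment_sprint
-- ===== SOURCE A (Python) =====
-- def increment_sprint(command,number,x,y):
--     """
--     Responsible for incrementing the sprint position and the decrementing the back postion.
--     """
--     lenght = command.split()
--     if "sprint" in command.lower() and len(lenght) == 2 and int(number) in range(-200,200):
--         for i in range(int(number)+1): y+=i
--         return x,y,command.lower()
--
--
--     elif "back" in command.lower() and len(lenght) == 2 and int(number) in range(-200,200):
--         y -= int(number)
--         return x,y,command.lower()
--
--     else:
--         return x,y,command.lower()
-- ===== SOURCE B (Python) =====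
-- def increment_sprint(command, number, x, y):
--     """Closed-form rewrite: triangular-number formula instead of the accumulation loop."""
--     cmd = command.lower()
--     if len(command.split()) == 2 and ("sprint" in cmd or "back" in cmd):
--         n = int(number)
--         if -200 <= n < 200:
--             if "sprint" in cmd:
--                 if n > 0:
--                     y += n * (n + 1) // 2
--             else:
--                 y -= n
--     return x, y, cmd
-- ===== Notes on version B (the rewrite author's own statement) =====
-- stated objective: simpler
-- what changed: The sprint branch's accumulation loop over range(n+1) is replaced by the closed-form triangular number n*(n+1)//2 (guarded for non-positive n), and the three separately repeated guard conditions are restructured into one nested check that lowers and parses once.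
import Mathlib
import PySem

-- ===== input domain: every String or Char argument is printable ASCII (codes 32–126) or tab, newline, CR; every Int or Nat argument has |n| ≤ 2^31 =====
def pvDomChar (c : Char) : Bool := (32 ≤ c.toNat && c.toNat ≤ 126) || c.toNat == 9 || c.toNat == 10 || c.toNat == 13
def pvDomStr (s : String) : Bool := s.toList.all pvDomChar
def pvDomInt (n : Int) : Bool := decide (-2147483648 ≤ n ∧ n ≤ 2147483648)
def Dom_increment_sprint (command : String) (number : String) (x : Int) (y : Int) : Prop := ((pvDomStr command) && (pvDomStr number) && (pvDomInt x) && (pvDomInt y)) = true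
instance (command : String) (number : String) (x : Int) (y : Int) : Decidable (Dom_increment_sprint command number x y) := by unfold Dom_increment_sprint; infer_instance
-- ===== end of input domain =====

-- B replaces A's accumulation loop by the closed-form triangular number n*(n+1)//2 under a single
-- restructured guard; objective: simpler.

-- ===== PORT A =====
def increment_sprint (command : String) (number : String) (x : Int) (y : Int) : Int × Int × String :=
  let lenght := PySem.Str.split₀ command
  -- int(number): Python raises ValueError when number does not parse; those inputs are outside
  -- Pre_increment_sprint, so the default 0 is never observed on admitted inputs.
  let n := (PySem.Int.ofStr? number).getD 0
  if PySem.Str.isIn "sprint" (PySem.Str.lower command) && (lenght.length == 2)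
      && decide (-200 ≤ n ∧ n < 200) then
    let y := (PySem.List.pyRange 0 (n+1) 1).foldl (fun acc i => acc + i) y
    (x, y, PySem.Str.lower command)
  else if PySem.Str.isIn "back" (PySem.Str.lower command) && (lenght.length == 2)
      && decide (-200 ≤ n ∧ n < 200) then
    (x, y - n, PySem.Str.lower command)
  else
    (x, y, PySem.Str.lower command)

-- ===== PORT B =====
def increment_sprint_alt (command : String) (number : String) (x : Int) (y : Int) : Int × Int × String :=
  let cmd := PySem.Str.lower command
  let y' :=
    if ((PySem.Str.split₀ command).length == 2)
        && (PySem.Str.isIn "sprint" cmd || PySem.Str.isIn "back" cmd) then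
      -- int(number): raises in Python when unparsable (outside Pre_); default 0 never observed there.
      let n := (PySem.Int.ofStr? number).getD 0
      if decide (-200 ≤ n ∧ n < 200) then
        if PySem.Str.isIn "sprint" cmd then
          if decide (0 < n) then y + PySem.Int.floordiv (n * (n+1)) 2 else y
        else y - n
      else y
    else y
  (x, y', cmd)

-- ===== PRECONDITION & SPEC =====
-- Pre_ excludes exactly the inputs where Python A raises ValueError: a two-word command containing
-- "sprint" or "back" together with a number string int() cannot parse.
def Pre_increment_sprint (command : String) (number : String) (x : Int) (y : Int) : Prop :=
  (PySem.Int.ofStr? number).isSome = true ∨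
  ¬ ((PySem.Str.split₀ command).length = 2 ∧
     (PySem.Str.isIn "sprint" (PySem.Str.lower command) = true ∨
      PySem.Str.isIn "back" (PySem.Str.lower command) = true))
instance (command : String) (number : String) (x : Int) (y : Int) : Decidable (Pre_increment_sprint command number x y) := by unfold Pre_increment_sprint; infer_instance

def pvWitness_increment_sprint : String × String × Int × Int := ("sprint 5", "5", 0, 0)

def Spec_increment_sprint (command : String) (number : String) (x : Int) (y : Int) (out : Int × Int × String) : Prop := out = increment_sprint_alt command number x y
instance (command : String) (number : String) (x : Int) (y : Int) (out : Int × Int × String) : Decidable (Spec_increment_sprint command number x y out) := by unfold Spec_increment_sprint; infer_instance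

-- ===== CLAIM (what is proved, stated in full; the proofs are below) =====
def Claim_equal_increment_sprint : Prop := ∀ (command : String) (number : String) (x : Int) (y : Int), Dom_increment_sprint command number x y → Pre_increment_sprint command number x y → Spec_increment_sprint command number x y (increment_sprint command number x y)

-- ===== LEMMAS AND PROOFS =====

-- Gauss: sum of 0..m-1, stated in Nat with truncated subtraction.
lemma range_sum_gauss (m : Nat) : (List.range m).sum * 2 = m * (m-1) := by
  induction m with
  | zero => rfl
  | succ m ih =>
    rw [List.range_succ, List.sum_append]
    simp only [List.sum_cons, List.sum_nil]
    cases m with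
    | zero => rfl
    | succ k => simp only [Nat.succ_sub_one] at ih ⊢; nlinarith [ih]

-- A's accumulation loop over range(n+1) equals B's guarded closed form.
lemma tri_fold (n y : Int) :
    (PySem.List.pyRange 0 (n+1) 1).foldl (fun acc i => acc + i) y
      = if 0 < n then y + PySem.Int.floordiv (n * (n+1)) 2 else y := by
  have h1 : (PySem.List.pyRange 0 (n+1) 1).foldl (fun acc i => acc + i) y
      = y + ((PySem.List.pyRange 0 (n+1) 1).map (fun i => i)).sum :=
    PySem.List.foldl_add _ (fun i => i) y
  rw [h1, List.map_id', PySem.List.pyRange_one]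
  have h2 : ∀ m : Nat, (List.map (fun k : Nat => (0:Int) + (k:Int)) (List.range m)).sum
      = ((List.range m).sum : Int) := by
    intro m
    induction m with
    | zero => rfl
    | succ m ih =>
      rw [List.range_succ, List.map_append, List.sum_append, ih, List.sum_append]
      push_cast
      simp
  rw [h2]
  by_cases h : 0 < n
  · rw [if_pos h]
    have hg := range_sum_gauss (n+1-0).toNat
    have hc : (((n+1-0:Int)).toNat : Int) = n + 1 := by omega
    have h1m : (1:Nat) ≤ (n+1-0:Int).toNat := by omega
    zify [h1m] at hg
    rw [hc] at hg
    rw [PySem.Int.floordiv_eq_ediv_of_pos (show (0:Int) < 2 by omega)]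
    have hs2 : ((List.range (n+1-0).toNat).sum : Int) * 2 = n * (n+1) := by
      push_cast
      rw [hg]; ring
    generalize hp : n * (n+1) = p at hs2 ⊢
    omega
  · rw [if_neg h]
    have : ((n+1-0:Int)).toNat = 0 ∨ (n+1-0:Int).toNat = 1 := by omega
    rcases this with h0 | h1
    · rw [h0]; simp
    · rw [h1]; simp

-- ===== VERDICT (by name: the statement is the Claim_ definition above) =====
theorem increment_sprint_spec : Claim_equal_increment_sprint := by
  intro command number x y _ _
  unfold Spec_increment_sprint increment_sprint increment_sprint_alt
  set cmd := PySem.Str.lower command with hcmd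
  set n := (PySem.Int.ofStr? number).getD 0 with hn
  by_cases hs : PySem.Str.isIn "sprint" cmd = true <;>
    by_cases hb : PySem.Str.isIn "back" cmd = true <;>
      by_cases hl : (PySem.Str.split₀ command).length = 2 <;>
        by_cases hr : -200 ≤ n ∧ n < 200 <;>
          simp [PySem.Str.isIn_eq] at hs hb <;>
          simp [hs, hb, hl, hr, tri_fold]
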